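-- pv_equiv track=rewrite | github.com/YinyanBu/ECE143 | gather_values.py | gather_values
-- ===== SOURCE A (Python) =====
-- def gather_values(x):
--     '''
--     Generate a new dictionary with bitstrings as keys and with values as lists that
--     contain the corresponding mapped values from map_bitstring.
--     input item: x
--     input type: list
--     output: dict
--
--     '''
--     assert isinstance(x,list)
--     result=dict()
--     for i in x:
--         result[i]=[]
--     for j in x:
--         if j.count('0')>j.count('1'):
--             result[j].append(0)
--         else:
--             result[j].append(1)
--     return result
-- ===== SOURCE B (Python) =====
-- def gather_values(x):
--     '''
--     Same task as A: dict from bitstring to list of majority-bit indicators,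
--     one entry per occurrence. Count-first strategy: build a multiplicity
--     table in one pass, then emit [indicator]*count once per distinct key.
--     '''
--     assert isinstance(x, list)
--     counts = {}
--     for s in x:
--         counts[s] = counts.get(s, 0) + 1
--     result = {}
--     for key, c in counts.items():
--         result[key] = [0 if key.count('0') > key.count('1') else 1] * c
--     return result
-- ===== Notes on version B (the rewrite author's own statement) =====
-- stated objective: alternative
-- what changed: A appends the indicator once per occurrence into pre-created empty lists (two passes over all elements with a string-count per occurrence); B builds a multiplicity table in one pass and then, once per distinct key, computes the indicator a single time and emits [indicator]*count.
import Mathlib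
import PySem

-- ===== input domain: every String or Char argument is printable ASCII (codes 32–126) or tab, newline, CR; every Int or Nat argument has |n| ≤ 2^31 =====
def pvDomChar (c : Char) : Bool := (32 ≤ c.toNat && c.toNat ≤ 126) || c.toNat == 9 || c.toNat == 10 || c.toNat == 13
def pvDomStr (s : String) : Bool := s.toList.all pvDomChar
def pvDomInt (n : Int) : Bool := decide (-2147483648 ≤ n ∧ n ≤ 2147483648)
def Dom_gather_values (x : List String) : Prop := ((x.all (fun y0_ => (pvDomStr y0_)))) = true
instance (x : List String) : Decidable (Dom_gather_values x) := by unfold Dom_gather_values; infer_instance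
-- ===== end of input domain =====

-- B computes the majority indicator once per distinct key via a count table instead of appending per occurrence (objective: alternative).

-- ===== PORT A =====
-- the value appended for a given bitstring j
def pvInd (j : String) : Int :=
  if PySem.Str.count j "0" > PySem.Str.count j "1" then 0 else 1

def gather_values (x : List String) : List (String × List Int) :=
  -- result = dict(); for i in x: result[i] = []
  let d1 : PySem.Dict String (List Int) :=
    x.foldl (fun d i => d.insert i ([] : List Int)) PySem.Dict.empty
  -- for j in x: result[j].append(0 or 1)
  let d2 := x.foldl (fun d j => d.modify j [] (fun v => v ++ [pvInd j])) d1
  d2.items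

-- ===== PORT B =====
def gather_values_alt (x : List String) : List (String × List Int) :=
  -- counts = {}; for s in x: counts[s] = counts.get(s, 0) + 1
  let counts : PySem.Dict String Int :=
    x.foldl (fun d s => d.insert s (d.getD s 0 + 1)) PySem.Dict.empty
  -- result = {}; for key, c in counts.items(): result[key] = [ind(key)] * c
  let result : PySem.Dict String (List Int) :=
    counts.items.foldl (fun r p => r.insert p.1 (List.replicate p.2.toNat (pvInd p.1))) PySem.Dict.empty
  result.items

-- ===== PRECONDITION & SPEC =====
def Spec_gather_values (x : List String) (out : List (String × List Int)) : Prop := out = gather_values_alt x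
instance (x : List String) (out : List (String × List Int)) : Decidable (Spec_gather_values x out) := by unfold Spec_gather_values; infer_instance

-- ===== CLAIM (what is proved, stated in full; the proofs are below) =====
def Claim_equal_gather_values : Prop := ∀ (x : List String), Dom_gather_values x → Spec_gather_values x (gather_values x)

-- ===== LEMMAS AND PROOFS =====

-- a fold that only ever inserts [] leaves every getD-[] lookup at []
theorem pv_getD_insert_nil (x : List String) (d : PySem.Dict String (List Int)) (k : String)
    (h : d.getD k [] = []) :
    (x.foldl (fun d i => d.insert i ([] : List Int)) d).getD k [] = [] := by
  induction x generalizing d with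
  | nil => exact h
  | cons a t ih =>
      simp only [List.foldl_cons]
      exact ih _ (by rw [PySem.Dict.getD_insert]; split <;> simp [h])

-- filtering the occurrences of c and mapping f gives replicate(count) (f c)
theorem pv_filter_map_replicate (x : List String) (c : String) (f : String → Int) :
    ((x.filter (fun j => j == c)).map f) = List.replicate (x.count c) (f c) := by
  induction x with
  | nil => simp
  | cons a t ih =>
      by_cases hac : a = c
      · subst hac; simp [List.replicate_succ, ih]
      · simp [hac, ih, beq_iff_eq]

theorem pv_gather_items (x : List String) :
    gather_values x
      = (PySem.Set.ofList x).map
          (fun k => (k, List.replicate (x.count k) (pvInd k))) := by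
  unfold gather_values
  have hnd1 : (x.foldl (fun d i => d.insert i ([] : List Int)) PySem.Dict.empty).keys.Nodup :=
    PySem.Dict.nodup_keys_foldl_insert _ _ _ (by simp [PySem.Dict.keys_empty])
  have hnd2 : (x.foldl (fun d j => d.modify j [] (fun v => v ++ [pvInd j]))
      (x.foldl (fun d i => d.insert i ([] : List Int)) PySem.Dict.empty)).keys.Nodup :=
    PySem.Dict.nodup_keys_foldl_modify_key x id [] (fun d j v => v ++ [pvInd j]) _ hnd1
  rw [PySem.Dict.items_eq_map_keys _ hnd2 []]
  have hkeys1 : (x.foldl (fun d i => d.insert i ([] : List Int)) PySem.Dict.empty).keys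
      = PySem.Set.ofList x := by
    rw [PySem.Dict.keys_foldl_insert]
    simp [PySem.Dict.keys_empty, PySem.Set.update_nil_left]
  have hkeys2 : (x.foldl (fun d j => d.modify j [] (fun v => v ++ [pvInd j]))
      (x.foldl (fun d i => d.insert i ([] : List Int)) PySem.Dict.empty)).keys
      = PySem.Set.ofList x := by
    rw [PySem.Dict.keys_foldl_modify, hkeys1, PySem.Set.update_eq_append_filter]
    have : (PySem.Set.ofList x).filter
        (fun y => !(PySem.Set.contains (PySem.Set.ofList x) y)) = [] := by
      apply List.filter_eq_nil_iff.mpr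
      intro a ha
      simp [PySem.Set.contains, ha]
    rw [this, List.append_nil]
  rw [hkeys2]
  apply List.map_congr_left
  intro k hk
  -- rewrite the modify-fold as a fold over pairs, then use getD_foldl_modify_append
  have hfold :
      (x.foldl (fun d j => d.modify j [] (fun v => v ++ [pvInd j]))
        (x.foldl (fun d i => d.insert i ([] : List Int)) PySem.Dict.empty))
      = ((x.map (fun j => (j, pvInd j))).foldl
          (fun d p => d.modify p.1 [] (fun v => v ++ [p.2]))
          (x.foldl (fun d i => d.insert i ([] : List Int)) PySem.Dict.empty)) := by
    rw [List.foldl_map]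
  rw [hfold, PySem.Dict.getD_foldl_modify_append,
      pv_getD_insert_nil x _ k (by simp [PySem.Dict.getD_empty])]
  have : ((x.map (fun j => (j, pvInd j))).filter (fun p => p.1 == k)).map (·.2)
      = ((x.filter (fun j => j == k)).map pvInd) := by
    rw [List.filter_map, List.map_map]; rfl
  rw [List.nil_append, this, pv_filter_map_replicate]

theorem pv_alt_items (x : List String) :
    gather_values_alt x
      = (PySem.Set.ofList x).map
          (fun k => (k, List.replicate (x.count k) (pvInd k))) := by
  unfold gather_values_alt
  have hc : (x.foldl (fun d s => d.insert s (d.getD s 0 + 1)) PySem.Dict.empty)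
      = PySem.Dict.counter x := PySem.Dict.foldl_insert_getD_add_one_eq_counter x
  rw [hc]
  have hitems := PySem.Dict.items_counter (xs := x)
  simp only [hitems]
  have hnodup : (((PySem.Set.ofList x).map (fun k => (k, (x.count k : Int)))).map (·.1)).Nodup := by
    have heq : (((PySem.Set.ofList x).map (fun k => (k, (x.count k : Int)))).map (·.1))
        = PySem.Set.ofList x := by simp [Function.comp_def]
    rw [heq]; exact PySem.Set.nodup_ofList x
  have hfresh : ∀ p ∈ (PySem.Set.ofList x).map (fun k => (k, (x.count k : Int))),
      (PySem.Dict.empty : PySem.Dict String (List Int)).contains p.1 = false := by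
    intro p _; simp [PySem.Dict.contains_empty]
  rw [PySem.Dict.items_foldl_insert_fresh _ _ _ _ hfresh hnodup]
  simp [List.map_map, Function.comp_def, PySem.Dict.empty]

-- ===== VERDICT (by name: the statement is the Claim_ definition above) =====
theorem gather_values_spec : Claim_equal_gather_values := by
  intro x _
  unfold Spec_gather_values
  rw [pv_gather_items, pv_alt_items]
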